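-- pv_equiv track=rewrite | github.com/cgooden-TE/LTRRT-Promoter-Suite | WindowScrubber.py | find_alternating_ca_runs
-- ===== SOURCE A (Python) =====
-- from typing import Dict, List, Tuple, Optional
--
-- def find_alternating_ca_runs(seq: str, min_length: int = 10) -> List[Tuple[int, int]]:
--     """Find all maximal alternating CA runs of length >= min_length."""
--     runs = []
--     i = 0
--     while i < len(seq) - 1:
--         if (seq[i] == 'C' and seq[i+1] == 'A') or (seq[i] == 'A' and seq[i+1] == 'C'):
--             start = i
--             if seq[i] == 'C':
--                 j = i
--                 while j < len(seq) - 1 and seq[j] == 'C' and seq[j+1] == 'A':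
--                     j += 2
--                 end = j
--             else:
--                 j = i
--                 while j < len(seq) - 1 and seq[j] == 'A' and seq[j+1] == 'C':
--                     j += 2
--                 end = j
--
--             run_length = end - start
--             if run_length >= min_length:
--                 runs.append((start, end))
--             i = end
--         else:
--             i += 1
--     return runs
-- ===== SOURCE B (Python) =====
-- def find_alternating_ca_runs(seq, min_length=10):
--     """Find all maximal alternating CA runs of length >= min_length.
--
--     One flat scan: find each maximal alternating segment over {C, A}
--     (adjacent chars differ), then emit its even-truncated span.
--     """
--     runs = []
--     n = len(seq)
--     i = 0
--     while i < n:
--         c = seq[i]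
--         if c == 'C' or c == 'A':
--             start = i
--             prev = c
--             i += 1
--             while i < n and (seq[i] == 'C' or seq[i] == 'A') and seq[i] != prev:
--                 prev = seq[i]
--                 i += 1
--             L = i - start
--             ev = 2 * (L // 2)
--             if L >= 2 and ev >= min_length:
--                 runs.append((start, start + ev))
--         else:
--             i += 1
--     return runs
-- ===== Notes on version B (the rewrite author's own statement) =====
-- stated objective: faster
-- what changed: B replaces A's phase-locked pair-stepping (two C-vs-A branches, each re-testing a pair of positions and advancing by 2) with a single flat scan that finds each maximal alternating {C,A} segment by comparing each char to its predecessor, then emits the even-truncated span (start, start + 2*(L//2)) in closed form; the constant-factor win comes from one comparison chain per position instead of the pair re-tests and branch dispatch.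
import Mathlib
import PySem

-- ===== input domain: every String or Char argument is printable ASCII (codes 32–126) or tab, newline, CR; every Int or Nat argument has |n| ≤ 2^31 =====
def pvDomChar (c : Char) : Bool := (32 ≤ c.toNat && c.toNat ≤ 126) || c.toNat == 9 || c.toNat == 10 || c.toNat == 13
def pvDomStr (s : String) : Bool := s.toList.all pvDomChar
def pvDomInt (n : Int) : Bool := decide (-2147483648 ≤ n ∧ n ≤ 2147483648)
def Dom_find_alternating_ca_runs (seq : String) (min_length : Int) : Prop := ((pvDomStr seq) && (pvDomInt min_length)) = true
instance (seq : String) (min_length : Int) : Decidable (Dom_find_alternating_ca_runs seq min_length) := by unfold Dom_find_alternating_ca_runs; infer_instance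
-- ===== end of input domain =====

-- B replaces A's phase-locked pair-stepping with one flat predecessor-comparing scan
-- over maximal alternating {C,A} segments plus a closed-form even truncation (objective: simpler).
-- All Python indexing below is guarded in range (i < len-1, j < len-1, i < n), so List.getD is exact.

-- ===== PORT A =====
-- inner `while j < len(seq)-1 and seq[j] == x and seq[j+1] == y: j += 2`
-- fuel only makes the loop total; with fuel = cs.length it never runs out (j grows by 2 each step).
def aInner (cs : List Char) (x y : Char) : Nat → Nat → Nat
  | 0, j => j
  | fuel+1, j =>
    if j + 1 < cs.length ∧ cs.getD j ' ' = x ∧ cs.getD (j+1) ' ' = y then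
      aInner cs x y fuel (j+2)
    else j

-- outer `while i < len(seq)-1` loop; fuel = cs.length + 1 suffices (i grows by ≥ 1 each iteration).
def aLoop (cs : List Char) (m : Int) : Nat → Nat → List (Int × Int) → List (Int × Int)
  | 0, _, acc => acc
  | fuel+1, i, acc =>
    if i + 1 < cs.length then
      let c0 := cs.getD i ' '
      let c1 := cs.getD (i+1) ' '
      if (c0 = 'C' ∧ c1 = 'A') ∨ (c0 = 'A' ∧ c1 = 'C') then
        let e := if c0 = 'C' then aInner cs 'C' 'A' cs.length i else aInner cs 'A' 'C' cs.length i
        let acc' := if ((e : Int) - (i : Int)) ≥ m then acc ++ [((i : Int), (e : Int))] else acc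
        aLoop cs m fuel e acc'
      else aLoop cs m fuel (i+1) acc
    else acc

def find_alternating_ca_runs (seq : String) (min_length : Int) : List (Int × Int) :=
  aLoop seq.toList min_length (seq.toList.length + 1) 0 []

-- ===== PORT B =====
-- inner `while i < n and (seq[i]=='C' or seq[i]=='A') and seq[i] != prev: prev = seq[i]; i += 1`
def bScan (cs : List Char) : Nat → Char → Nat → Nat
  | 0, _, i => i
  | fuel+1, prev, i =>
    if i < cs.length ∧ (cs.getD i ' ' = 'C' ∨ cs.getD i ' ' = 'A') ∧ cs.getD i ' ' ≠ prev then
      bScan cs fuel (cs.getD i ' ') (i+1)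
    else i

-- outer `while i < n` loop of B.
def bLoop (cs : List Char) (m : Int) : Nat → Nat → List (Int × Int) → List (Int × Int)
  | 0, _, acc => acc
  | fuel+1, i, acc =>
    if i < cs.length then
      let c := cs.getD i ' '
      if c = 'C' ∨ c = 'A' then
        let s := bScan cs cs.length c (i+1)
        let L := s - i
        let ev := 2 * (L / 2)
        let acc' := if 2 ≤ L ∧ ((ev : Int)) ≥ m then acc ++ [((i : Int), (i : Int) + (ev : Int))] else acc
        bLoop cs m fuel s acc'
      else bLoop cs m fuel (i+1) acc
    else acc

def find_alternating_ca_runs_alt (seq : String) (min_length : Int) : List (Int × Int) :=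
  bLoop seq.toList min_length (seq.toList.length + 1) 0 []

-- ===== PRECONDITION & SPEC =====
def Spec_find_alternating_ca_runs (seq : String) (min_length : Int) (out : List (Int × Int)) : Prop := out = find_alternating_ca_runs_alt seq min_length
instance (seq : String) (min_length : Int) (out : List (Int × Int)) : Decidable (Spec_find_alternating_ca_runs seq min_length out) := by unfold Spec_find_alternating_ca_runs; infer_instance

-- ===== CLAIM (what is proved, stated in full; the proofs are below) =====
def Claim_equal_find_alternating_ca_runs : Prop := ∀ (seq : String) (min_length : Int), Dom_find_alternating_ca_runs seq min_length → Spec_find_alternating_ca_runs seq min_length (find_alternating_ca_runs seq min_length)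

-- ===== LEMMAS AND PROOFS =====

def pairCA (x y : Char) : Prop := (x = 'C' ∧ y = 'A') ∨ (x = 'A' ∧ y = 'C')

lemma aLoop_stop (cs : List Char) (m : Int) (f i : Nat) (acc : List (Int × Int))
    (h : ¬ i + 1 < cs.length) : aLoop cs m f i acc = acc := by
  cases f with
  | zero => rfl
  | succ f => simp only [aLoop, if_neg h]

lemma bLoop_ge (cs : List Char) (m : Int) (f i : Nat) (acc : List (Int × Int))
    (h : ¬ i < cs.length) : bLoop cs m f i acc = acc := by
  cases f with
  | zero => rfl
  | succ f => simp only [bLoop, if_neg (by intro h'; exact h h')]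

lemma bScan_stop (cs : List Char) (f : Nat) (p : Char) (i : Nat)
    (h : ¬ (i < cs.length ∧ (cs.getD i ' ' = 'C' ∨ cs.getD i ' ' = 'A') ∧ cs.getD i ' ' ≠ p)) :
    bScan cs f p i = i := by
  cases f with
  | zero => rfl
  | succ f => simp only [bScan, if_neg h]

lemma inner_rel (cs : List Char) : ∀ (f1 : Nat), ∀ (f2 j : Nat) (x y : Char),
    pairCA x y →
    cs.length ≤ j + 1 + 2 * f1 → cs.length ≤ j + 1 + f2 →
    j + 1 < cs.length → cs.getD j ' ' = x → cs.getD (j+1) ' ' = y →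
    j + 2 ≤ aInner cs x y f1 j ∧
    (aInner cs x y f1 j - j) % 2 = 0 ∧
    (bScan cs f2 x (j+1) = aInner cs x y f1 j ∨
      (bScan cs f2 x (j+1) = aInner cs x y f1 j + 1 ∧
        (aInner cs x y f1 j + 1 < cs.length →
          ¬ pairCA (cs.getD (aInner cs x y f1 j) ' ') (cs.getD (aInner cs x y f1 j + 1) ' ')))) := by
  intro f1
  induction f1 with
  | zero => intro f2 j x y hp hf1 hf2 hj hx hy; omega
  | succ f1 ih =>
    intro f2 j x y hp hf1 hf2 hj hx hy
    have hxy : x ≠ y := by rcases hp with ⟨h1, h2⟩ | ⟨h1, h2⟩ <;> simp [h1, h2]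
    have hyCA : y = 'C' ∨ y = 'A' := by rcases hp with ⟨h1, h2⟩ | ⟨h1, h2⟩ <;> simp [h2]
    -- one unfold of aInner: condition at j holds
    have ha1 : aInner cs x y (f1+1) j = aInner cs x y f1 (j+2) := by
      simp only [aInner, if_pos (⟨hj, hx, hy⟩ :
        j + 1 < cs.length ∧ cs.getD j ' ' = x ∧ cs.getD (j+1) ' ' = y)]
    -- one unfold of bScan: condition at j+1 holds
    obtain ⟨f2', rfl⟩ : ∃ f2', f2 = f2' + 1 := ⟨f2 - 1, by omega⟩
    have hb1 : bScan cs (f2' + 1) x (j+1) = bScan cs f2' y (j+2) := by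
      simp only [bScan, hy]
      rw [if_pos (⟨hj, hyCA, fun h => hxy h.symm⟩ :
        (j+1) < cs.length ∧ (y = 'C' ∨ y = 'A') ∧ y ≠ x)]
    rw [ha1, hb1]
    by_cases h : (j+2) + 1 < cs.length ∧ cs.getD (j+2) ' ' = x ∧ cs.getD (j+3) ' ' = y
    · -- both loops continue: reduce to IH at j+2
      obtain ⟨hlt, hx2, hy2⟩ := h
      obtain ⟨f2'', rfl⟩ : ∃ k, f2' = k + 1 := ⟨f2' - 1, by omega⟩
      have hxCA : x = 'C' ∨ x = 'A' := by
        rcases hp with ⟨h1, _⟩ | ⟨h1, _⟩ <;> simp [h1]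
      have hb2 : bScan cs (f2'' + 1) y (j+2) = bScan cs f2'' x (j+3) := by
        simp only [bScan, hx2]
        rw [if_pos (⟨by omega, hxCA, hxy⟩ :
          (j+2) < cs.length ∧ (x = 'C' ∨ x = 'A') ∧ x ≠ y)]
      rw [hb2]
      have := ih f2'' (j+2) x y hp (by omega) (by omega) hlt hx2 (by exact hy2)
      refine ⟨by omega, by omega, ?_⟩
      rcases this.2.2 with h' | ⟨h1', h2'⟩
      · exact Or.inl h'
      · exact Or.inr ⟨h1', h2'⟩
    · -- aInner stops at j+2
      have ha2 : aInner cs x y f1 (j+2) = j + 2 := by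
        cases f1 with
        | zero => rfl
        | succ f1 => simp only [aInner, if_neg (by exact_mod_cast h)]
      rw [ha2]
      by_cases h2 : j + 2 < cs.length ∧ cs.getD (j+2) ' ' = x
      · -- odd leftover: bScan takes one more step then stops at j+3
        obtain ⟨hlt2, hx2⟩ := h2
        obtain ⟨f2'', rfl⟩ : ∃ k, f2' = k + 1 := ⟨f2' - 1, by omega⟩
        have hxCA : x = 'C' ∨ x = 'A' := by
          rcases hp with ⟨h1, _⟩ | ⟨h1, _⟩ <;> simp [h1]
        have hb2 : bScan cs (f2'' + 1) y (j+2) = bScan cs f2'' x (j+3) := by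
          simp only [bScan, hx2]
          rw [if_pos (⟨hlt2, hxCA, hxy⟩ :
            (j+2) < cs.length ∧ (x = 'C' ∨ x = 'A') ∧ x ≠ y)]
        have hstop : ¬ (j + 3 < cs.length ∧
            (cs.getD (j+3) ' ' = 'C' ∨ cs.getD (j+3) ' ' = 'A') ∧ cs.getD (j+3) ' ' ≠ x) := by
          rintro ⟨hlt3, hCA3, hne3⟩
          have : cs.getD (j+3) ' ' = y := by
            rcases hp with ⟨h1, h2⟩ | ⟨h1, h2⟩ <;> rw [h1] at hne3 <;> rw [h2] <;> tauto
          exact h ⟨by omega, hx2, this⟩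
        rw [hb2, bScan_stop cs f2'' x (j+3) hstop]
        refine ⟨le_refl _, by omega, Or.inr ⟨rfl, ?_⟩⟩
        intro hlt3 hpair
        have : cs.getD (j+3) ' ' = y := by
          rw [hx2] at hpair
          rcases hp with ⟨h1, h2⟩ | ⟨h1, h2⟩ <;> rw [h1] at hpair <;> rw [h2] <;>
            rcases hpair with ⟨_, hc⟩ | ⟨hc, _⟩ <;> simp_all
        exact h ⟨by omega, hx2, this⟩
      · -- even stop: bScan stops at j+2 as well
        have hstop : ¬ (j + 2 < cs.length ∧
            (cs.getD (j+2) ' ' = 'C' ∨ cs.getD (j+2) ' ' = 'A') ∧ cs.getD (j+2) ' ' ≠ y) := by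
          rintro ⟨hlt2, hCA2, hne2⟩
          have : cs.getD (j+2) ' ' = x := by
            rcases hp with ⟨h1, h2⟩ | ⟨h1, h2⟩ <;> rw [h2] at hne2 <;> rw [h1] <;> tauto
          exact h2 ⟨hlt2, this⟩
        rw [bScan_stop cs f2' y (j+2) hstop]
        exact ⟨le_refl _, by omega, Or.inl rfl⟩

lemma outer_rel (cs : List Char) (m : Int) : ∀ (k : Nat), ∀ (i fa fb : Nat) (acc : List (Int × Int)),
    cs.length ≤ i + fa → cs.length ≤ i + fb → cs.length - i ≤ k →
    aLoop cs m fa i acc = bLoop cs m fb i acc := by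
  intro k
  induction k with
  | zero =>
    intro i fa fb acc hfa hfb hk
    rw [aLoop_stop cs m fa i acc (by omega), bLoop_ge cs m fb i acc (by omega)]
  | succ k ih =>
    intro i fa fb acc hfa hfb hk
    by_cases hi : i + 1 < cs.length
    · -- both loops take a real step
      obtain ⟨fa', rfl⟩ : ∃ t, fa = t + 1 := ⟨fa - 1, by omega⟩
      obtain ⟨fb', rfl⟩ : ∃ t, fb = t + 1 := ⟨fb - 1, by omega⟩
      by_cases hp : pairCA (cs.getD i ' ') (cs.getD (i+1) ' ')
      · -- A: alternating run found; B: segment branch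
        have hica : cs.getD i ' ' = 'C' ∨ cs.getD i ' ' = 'A' := by
          rcases hp with ⟨h1, _⟩ | ⟨h1, _⟩
          · exact Or.inl h1
          · exact Or.inr h1
        have hrel := inner_rel cs cs.length cs.length i (cs.getD i ' ') (cs.getD (i+1) ' ')
          hp (by omega) (by omega) hi rfl rfl
        set e := aInner cs (cs.getD i ' ') (cs.getD (i+1) ' ') cs.length i with he
        set s := bScan cs cs.length (cs.getD i ' ') (i+1) with hs
        obtain ⟨hei, hmod, hors⟩ := hrel
        -- A's branch on seq[i] == 'C' computes the same aInner call
        have haeq : (if cs.getD i ' ' = 'C' then aInner cs 'C' 'A' cs.length i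
            else aInner cs 'A' 'C' cs.length i) = e := by
          rcases hp with ⟨h1, h2⟩ | ⟨h1, h2⟩
          · rw [if_pos h1, he, h1, h2]
          · rw [if_neg (by rw [h1]; decide), he, h1, h2]
        have hse : s = e ∨ s = e + 1 := by
          rcases hors with h' | ⟨h', _⟩ <;> [exact Or.inl h'; exact Or.inr h']
        have hev : 2 * ((s - i) / 2) = e - i := by omega
        have hL2 : 2 ≤ s - i := by omega
        -- the emitted accumulator is the same
        have hacc : (if ((e : Int) - (i : Int)) ≥ m then acc ++ [((i : Int), (e : Int))] else acc)
            = (if 2 ≤ s - i ∧ ((2 * ((s - i) / 2) : Nat) : Int) ≥ m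
                then acc ++ [((i : Int), (i : Int) + ((2 * ((s - i) / 2) : Nat) : Int))] else acc) := by
          have h1 : (((2 * ((s - i) / 2) : Nat)) : Int) = (e : Int) - (i : Int) := by
            rw [hev]; omega
          have h2 : (i : Int) + ((e : Int) - (i : Int)) = (e : Int) := by ring
          rw [h1, h2]
          by_cases hm : ((e : Int) - (i : Int)) ≥ m
          · rw [if_pos hm, if_pos ⟨hL2, hm⟩]
          · rw [if_neg hm, if_neg (by rintro ⟨_, h⟩; exact hm h)]
        -- unfold one step of each loop
        simp only [aLoop, bLoop, if_pos hi, if_pos (show i < cs.length by omega),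
          if_pos (show (cs.getD i ' ' = 'C' ∧ cs.getD (i+1) ' ' = 'A') ∨
            (cs.getD i ' ' = 'A' ∧ cs.getD (i+1) ' ' = 'C') from hp),
          if_pos hica, haeq, ← hs, ← hacc]
        set acc' := if ((e : Int) - (i : Int)) ≥ m then acc ++ [((i : Int), (e : Int))] else acc
        rcases hse with hseq | hsucc
        · -- even segment: both continue from the same index
          rw [hseq]
          exact ih e fa' fb' acc' (by omega) (by omega) (by omega)
        · -- odd leftover: A makes one extra failing-pair step from e to e+1 = s
          rcases hors with h' | ⟨_, hnopair⟩
          · omega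
          by_cases hen : e + 1 < cs.length
          · obtain ⟨fa'', rfl⟩ : ∃ t, fa' = t + 1 := ⟨fa' - 1, by omega⟩
            have : aLoop cs m (fa'' + 1) e acc' = aLoop cs m fa'' (e+1) acc' := by
              simp only [aLoop, if_pos hen,
                if_neg (show ¬ ((cs.getD e ' ' = 'C' ∧ cs.getD (e+1) ' ' = 'A') ∨
                  (cs.getD e ' ' = 'A' ∧ cs.getD (e+1) ' ' = 'C')) from hnopair hen)]
            rw [this, hsucc]
            exact ih (e+1) fa'' fb' acc' (by omega) (by omega) (by omega)
          · rw [aLoop_stop cs m fa' e acc' hen, hsucc,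
              bLoop_ge cs m fb' (e+1) acc' (by omega)]
      · -- no alternating pair at i: both loops advance by one
        have hstep : aLoop cs m (fa' + 1) i acc = aLoop cs m fa' (i+1) acc := by
          simp only [aLoop, if_pos hi, if_neg (show ¬ ((cs.getD i ' ' = 'C' ∧ cs.getD (i+1) ' ' = 'A') ∨
            (cs.getD i ' ' = 'A' ∧ cs.getD (i+1) ' ' = 'C')) from hp)]
        rw [hstep]
        by_cases hca : cs.getD i ' ' = 'C' ∨ cs.getD i ' ' = 'A'
        · -- B opens a segment of length 1 and emits nothing
          have hscan : bScan cs cs.length (cs.getD i ' ') (i+1) = i + 1 := by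
            apply bScan_stop
            rintro ⟨_, hCA1, hne1⟩
            apply hp
            rcases hca with h1 | h1 <;> rw [h1] at hne1 ⊢ <;> rcases hCA1 with h2 | h2 <;>
              first
                | (exact absurd h2 hne1)
                | (exact Or.inl ⟨rfl, h2⟩)
                | (exact Or.inr ⟨rfl, h2⟩)
          have hbstep : bLoop cs m (fb' + 1) i acc = bLoop cs m fb' (i+1) acc := by
            simp only [bLoop, if_pos (show i < cs.length by omega), if_pos hca, hscan]
            have : i + 1 - i = 1 := by omega
            rw [this]
            simp
          rw [hbstep]
          exact ih (i+1) fa' fb' acc (by omega) (by omega) (by omega)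
        · have hbstep : bLoop cs m (fb' + 1) i acc = bLoop cs m fb' (i+1) acc := by
            simp only [bLoop, if_pos (show i < cs.length by omega), if_neg hca]
          rw [hbstep]
          exact ih (i+1) fa' fb' acc (by omega) (by omega) (by omega)
    · -- A is done; B may consume a final singleton tail
      rw [aLoop_stop cs m fa i acc hi]
      by_cases hin : i < cs.length
      · -- i = cs.length - 1
        obtain ⟨fb', rfl⟩ : ∃ t, fb = t + 1 := ⟨fb - 1, by omega⟩
        by_cases hca : cs.getD i ' ' = 'C' ∨ cs.getD i ' ' = 'A'
        · have hscan : bScan cs cs.length (cs.getD i ' ') (i+1) = i + 1 := by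
            apply bScan_stop; rintro ⟨hlt, _, _⟩; omega
          have : bLoop cs m (fb' + 1) i acc = bLoop cs m fb' (i+1) acc := by
            simp only [bLoop, if_pos hin, if_pos hca, hscan]
            have : i + 1 - i = 1 := by omega
            rw [this]
            simp
          rw [this, bLoop_ge cs m fb' (i+1) acc (by omega)]
        · have : bLoop cs m (fb' + 1) i acc = bLoop cs m fb' (i+1) acc := by
            simp only [bLoop, if_pos hin, if_neg hca]
          rw [this, bLoop_ge cs m fb' (i+1) acc (by omega)]
      · rw [bLoop_ge cs m fb i acc hin]

-- ===== VERDICT (by name: the statement is the Claim_ definition above) =====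
theorem find_alternating_ca_runs_spec : Claim_equal_find_alternating_ca_runs := by
  intro seq m _
  unfold Spec_find_alternating_ca_runs find_alternating_ca_runs find_alternating_ca_runs_alt
  exact outer_rel seq.toList m (seq.toList.length) 0 (seq.toList.length + 1)
    (seq.toList.length + 1) [] (by omega) (by omega) (by omega)
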